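-- pv_equiv track=rewrite | github.com/Lunatik4872/Projet_Rumba_IA | Rumba_IA.py | profondeurMalPlace
-- ===== SOURCE A (Python) =====
-- def profondeurMalPlace(e,but):
--     res = 0
--     for i in range(len(e)):
--         e_p = [0] * (len(but[i]) - len(e[i])) + e[i]
--         but_p = [0] * (len(e[i]) - len(but[i])) + but[i]
--         for j in range(len(e_p)):
--             if e_p[j] != but_p[j] and e_p[j] != 0 :
--                 res += j
--     return res
-- ===== SOURCE B (Python) =====
-- def profondeurMalPlace(e, but):
--     # Inclusion-exclusion: add the aligned position of every nonzero entry of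
--     # e[i], then subtract the positions where the right-aligned overlap of
--     # e[i] and but[i] agrees on a nonzero value.  No padded copies are built.
--     res = 0
--     for x, y in zip(e, but):
--         L = max(len(x), len(y))
--         t = min(len(x), len(y))
--         res += sum(L - len(x) + m for m, v in enumerate(x) if v != 0)
--         res -= sum(L - t + m
--                    for m, (v, w) in enumerate(zip(x[len(x) - t:], y[len(y) - t:]))
--                    if v != 0 and v == w)
--     return res
-- ===== Notes on version B (the rewrite author's own statement) =====
-- stated objective: alternative
-- what changed: B computes each row by inclusion-exclusion -- the sum of aligned positions of all nonzero entries of e[i] minus the positions where the right-aligned overlap slices of e[i] and but[i] agree on a nonzero value -- instead of A's scan of zero-padded copies testing each position for a mismatch.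
import Mathlib
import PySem

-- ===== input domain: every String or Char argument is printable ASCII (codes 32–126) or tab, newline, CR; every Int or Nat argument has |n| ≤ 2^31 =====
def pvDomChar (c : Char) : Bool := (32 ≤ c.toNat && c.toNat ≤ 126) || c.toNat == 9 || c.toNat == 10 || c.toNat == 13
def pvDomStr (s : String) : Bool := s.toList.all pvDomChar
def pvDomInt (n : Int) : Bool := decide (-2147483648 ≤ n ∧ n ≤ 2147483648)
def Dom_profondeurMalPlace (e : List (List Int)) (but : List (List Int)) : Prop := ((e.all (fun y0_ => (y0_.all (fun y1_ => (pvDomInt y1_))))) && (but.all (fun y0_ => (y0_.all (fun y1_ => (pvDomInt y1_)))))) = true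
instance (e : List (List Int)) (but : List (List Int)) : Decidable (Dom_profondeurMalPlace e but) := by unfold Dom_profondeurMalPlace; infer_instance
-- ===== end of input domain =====

-- B computes the same heuristic by inclusion–exclusion (sum of aligned positions of all
-- nonzero e-entries minus the positions where the right-aligned overlap agrees on a
-- nonzero value) instead of scanning zero-padded copies; equal on Pre_ (len(e) ≤ len(but)).

-- ===== PORT A =====
-- literal transliteration: outer loop over range(len(e)), builds the padded rows,
-- inner loop over range(len(e_p)). Row lookups e[i]/but[i] are totalized with getD [];
-- Pre_ keeps i in range so this is exact.
def profondeurMalPlace (e : List (List Int)) (but : List (List Int)) : Int :=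
  (List.range e.length).foldl (fun res i =>
    let ei := e.getD i []
    let bi := but.getD i []
    let e_p := List.replicate (bi.length - ei.length) (0 : Int) ++ ei
    let but_p := List.replicate (ei.length - bi.length) (0 : Int) ++ bi
    (List.range e_p.length).foldl (fun r j =>
      if e_p.getD j 0 ≠ but_p.getD j 0 ∧ e_p.getD j 0 ≠ 0 then r + (j : Int) else r) res) 0

-- ===== PORT B =====
-- Source B: zip over the rows; per row, add sum(L-len(x)+m for nonzero x[m]) and subtract
-- sum(L-t+m for agreeing nonzero pairs of the right-aligned overlap slices).
-- x[len(x)-t:] is ported as List.drop (len(x)-t ≥ 0, so the slice is exactly drop).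
def profondeurMalPlace_alt (e : List (List Int)) (but : List (List Int)) : Int :=
  (e.zip but).foldl (fun res p =>
    let x := p.1
    let y := p.2
    let L : Nat := max x.length y.length
    let t : Nat := min x.length y.length
    let s1 : Int := (((PySem.List.enumerate x).filter (fun q => q.2 != 0)).map
        (fun q => ((L - x.length : Nat) : Int) + q.1)).sum
    let s2 : Int := (((PySem.List.enumerate ((x.drop (x.length - t)).zip (y.drop (y.length - t)))).filter
        (fun q => q.2.1 != 0 && q.2.1 == q.2.2)).map
        (fun q => ((L - t : Nat) : Int) + q.1)).sum
    res + s1 - s2) 0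

-- ===== PRECONDITION & SPEC =====
-- Pre_ excludes exactly the inputs where A raises IndexError (but[i] with i ≥ len(but)).
def Pre_profondeurMalPlace (e : List (List Int)) (but : List (List Int)) : Prop :=
  e.length ≤ but.length
instance (e : List (List Int)) (but : List (List Int)) : Decidable (Pre_profondeurMalPlace e but) := by unfold Pre_profondeurMalPlace; infer_instance
def pvWitness_profondeurMalPlace : List (List Int) × List (List Int) := ([[1, 2], [0, 3]], [[2, 1], [3]])

def Spec_profondeurMalPlace (e : List (List Int)) (but : List (List Int)) (out : Int) : Prop := out = profondeurMalPlace_alt e but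
instance (e : List (List Int)) (but : List (List Int)) (out : Int) : Decidable (Spec_profondeurMalPlace e but out) := by unfold Spec_profondeurMalPlace; infer_instance

-- ===== CLAIM (what is proved, stated in full; the proofs are below) =====
def Claim_equal_profondeurMalPlace : Prop := ∀ (e : List (List Int)) (but : List (List Int)), Dom_profondeurMalPlace e but → Pre_profondeurMalPlace e but → Spec_profondeurMalPlace e but (profondeurMalPlace e but)
-- ===== LEMMAS AND PROOFS =====

-- S1 u c : sum of positions (counted from c) of the nonzero entries of u
def S1 : List Int → Int → Int
  | [], _ => 0
  | a :: t, c => (if a ≠ 0 then c else 0) + S1 t (c + 1)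

-- S2 u v c : sum of positions of the indices where u and v agree on a nonzero value
def S2 : List Int → List Int → Int → Int
  | a :: t, b :: w, c => (if a ≠ 0 ∧ a = b then c else 0) + S2 t w (c + 1)
  | _, _, _ => 0

-- M u v c : A's per-row value on equal-length (padded) rows
def M : List Int → List Int → Int → Int
  | a :: t, b :: w, c => (if a ≠ b ∧ a ≠ 0 then c else 0) + M t w (c + 1)
  | _, _, _ => 0

-- two folds with pointwise-equal bodies agree
theorem foldl_ext {α β : Type} (f g : β → α → β) (l : List α) (r : β)
    (h : ∀ b a, a ∈ l → f b a = g b a) : l.foldl f r = l.foldl g r := by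
  induction l generalizing r with
  | nil => rfl
  | cons x t ih =>
    simp only [List.foldl_cons, h r x (by simp)]
    exact ih _ (fun b a ha => h b a (by simp [ha]))

-- A's inner loop over equal-length rows, as the recursion M
theorem M_fold (u : List Int) : ∀ (v : List Int) (c r : Int), u.length = v.length →
    (List.range u.length).foldl (fun r m =>
      if u.getD m 0 ≠ v.getD m 0 ∧ u.getD m 0 ≠ 0 then r + (c + (m : Int)) else r) r
    = r + M u v c := by
  induction u with
  | nil => intro v c r _; simp [M]
  | cons a t ih =>
    intro v c r h
    cases v with
    | nil => simp at h
    | cons b w =>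
      simp only [List.length_cons, List.range_succ_eq_map, List.foldl_cons, List.foldl_map,
        List.getD_cons_zero, List.getD_cons_succ]
      have hb : ∀ (r : Int) (m : Nat), m ∈ List.range t.length →
          (fun (r : Int) (m : Nat) =>
            if t.getD m 0 ≠ w.getD m 0 ∧ t.getD m 0 ≠ 0 then r + (c + ((m + 1 : Nat) : Int)) else r) r m
          = (fun (r : Int) (m : Nat) =>
            if t.getD m 0 ≠ w.getD m 0 ∧ t.getD m 0 ≠ 0 then r + ((c + 1) + (m : Int)) else r) r m := by
        intro r m _
        have h2 : (c + ((m + 1 : Nat) : Int)) = (c + 1) + (m : Int) := by push_cast; ring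
        beta_reduce
        rw [h2]
      rw [foldl_ext _ _ _ _ hb, ih w (c + 1) _ (by simpa using h)]
      simp only [M]
      by_cases hc : a ≠ b ∧ a ≠ 0 <;> simp [hc] <;> try ring

-- left zero-padding on the e side consumes the matching prefix of v
theorem M_padL (k : Nat) : ∀ (u v : List Int) (c : Int), k + u.length = v.length →
    M (List.replicate k 0 ++ u) v c = M u (v.drop k) (c + (k : Int)) := by
  induction k with
  | zero => intro u v c _; simp
  | succ k ih =>
    intro u v c h
    cases v with
    | nil => simp at h
    | cons b w =>
      simp only [List.replicate_succ, List.cons_append, List.drop_succ_cons]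
      rw [show M (0 :: (List.replicate k 0 ++ u)) (b :: w) c
            = (if (0:Int) ≠ b ∧ (0:Int) ≠ 0 then c else 0) + M (List.replicate k 0 ++ u) w (c + 1) from rfl]
      rw [ih u w (c + 1) (by simp only [List.length_cons] at h; omega)]
      simp only [if_neg (by simp : ¬((0:Int) ≠ b ∧ (0:Int) ≠ 0)), zero_add]
      have h3 : c + ((k + 1 : Nat) : Int) = c + 1 + (k : Int) := by push_cast; ring
      rw [h3]

-- left zero-padding on the but side: the overhang of u counts every nonzero entry
theorem M_padR (k : Nat) : ∀ (u v : List Int) (c : Int), k + v.length = u.length →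
    M u (List.replicate k 0 ++ v) c = S1 (u.take k) c + M (u.drop k) v (c + (k : Int)) := by
  induction k with
  | zero => intro u v c _; simp [S1]
  | succ k ih =>
    intro u v c h
    cases u with
    | nil => simp at h
    | cons a t =>
      simp only [List.replicate_succ, List.cons_append, List.take_succ_cons, List.drop_succ_cons]
      rw [show M (a :: t) (0 :: (List.replicate k 0 ++ v)) c
            = (if a ≠ (0:Int) ∧ a ≠ 0 then c else 0) + M t (List.replicate k 0 ++ v) (c + 1) from rfl]
      rw [ih t v (c + 1) (by simp only [List.length_cons] at h; omega), show S1 (a :: t.take k) c = (if a ≠ 0 then c else 0) + S1 (t.take k) (c + 1) from rfl]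
      by_cases ha : a = (0:Int) <;> simp [ha] <;> try ring_nf

-- inclusion–exclusion on equal-length rows
theorem M_decomp (u : List Int) : ∀ (v : List Int) (c : Int), u.length = v.length →
    M u v c = S1 u c - S2 u v c := by
  induction u with
  | nil => intro v c _; simp [M, S1, S2]
  | cons a t ih =>
    intro v c h
    cases v with
    | nil => simp at h
    | cons b w =>
      rw [show M (a :: t) (b :: w) c = (if a ≠ b ∧ a ≠ 0 then c else 0) + M t w (c + 1) from rfl,
        show S1 (a :: t) c = (if a ≠ 0 then c else 0) + S1 t (c + 1) from rfl,
        show S2 (a :: t) (b :: w) c = (if a ≠ 0 ∧ a = b then c else 0) + S2 t w (c + 1) from rfl,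
        ih w (c + 1) (by simpa using h)]
      by_cases h0 : a = 0
      · simp [h0]
      · by_cases hb : a = b <;> simp [h0, hb] <;> try ring

theorem S1_append (u : List Int) : ∀ (w : List Int) (c : Int),
    S1 (u ++ w) c = S1 u c + S1 w (c + (u.length : Int)) := by
  induction u with
  | nil => intro w c; simp [S1]
  | cons a t ih =>
    intro w c
    rw [List.cons_append, show S1 (a :: (t ++ w)) c = (if a ≠ 0 then c else 0) + S1 (t ++ w) (c + 1) from rfl,
      ih w (c + 1), show S1 (a :: t) c = (if a ≠ 0 then c else 0) + S1 t (c + 1) from rfl]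
    have : c + 1 + (t.length : Int) = c + ((a :: t).length : Int) := by simp; ring
    rw [this]; ring

-- B's first generator sum is S1
theorem B_sum1 (u : List Int) : ∀ (s c : Int),
    (((PySem.List.enumerate u s).filter (fun q => q.2 != 0)).map (fun q => c + q.1)).sum
    = S1 u (c + s) := by
  induction u with
  | nil => intro s c; simp [PySem.List.enumerate_nil, S1]
  | cons a t ih =>
    intro s c
    rw [PySem.List.enumerate_cons, show S1 (a :: t) (c + s) = (if a ≠ 0 then c + s else 0) + S1 t (c + s + 1) from rfl]
    by_cases ha : a = (0:Int)
    · rw [List.filter_cons_of_neg (by simp [ha]), ih (s + 1) c, if_neg (by simp [ha]),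
        show c + (s + 1) = c + s + 1 from by ring]
      ring
    · rw [List.filter_cons_of_pos (by simp [ha]), List.map_cons, List.sum_cons, ih (s + 1) c,
        if_pos ha, show c + (s + 1) = c + s + 1 from by ring]

-- B's second generator sum is S2
theorem B_sum2 (u : List Int) : ∀ (v : List Int) (s c : Int),
    (((PySem.List.enumerate (u.zip v) s).filter (fun q => q.2.1 != 0 && q.2.1 == q.2.2)).map
      (fun q => c + q.1)).sum = S2 u v (c + s) := by
  induction u with
  | nil => intro v s c; simp [PySem.List.enumerate_nil, S2]
  | cons a t ih =>
    intro v s c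
    cases v with
    | nil => simp [PySem.List.enumerate_nil, S2]
    | cons b w =>
      rw [List.zip_cons_cons, PySem.List.enumerate_cons,
        show S2 (a :: t) (b :: w) (c + s) = (if a ≠ 0 ∧ a = b then c + s else 0) + S2 t w (c + s + 1) from rfl]
      by_cases hc : a ≠ (0:Int) ∧ a = b
      · rw [List.filter_cons_of_pos (by rcases hc with ⟨h1, h2⟩; subst h2; simp [h1]),
          List.map_cons, List.sum_cons, ih w (s + 1) c, if_pos hc,
          show c + (s + 1) = c + s + 1 from by ring]
      · rw [List.filter_cons_of_neg (by simpa using fun h1 h2 => hc ⟨h1, h2⟩),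
          ih w (s + 1) c, if_neg hc, show c + (s + 1) = c + s + 1 from by ring]
        ring

-- the per-row equality: A's padded inner loop = B's inclusion–exclusion value
theorem row_eq (x y : List Int) (r : Int) :
    (List.range ((List.replicate (y.length - x.length) (0 : Int) ++ x).length)).foldl
      (fun r j =>
        if (List.replicate (y.length - x.length) (0 : Int) ++ x).getD j 0 ≠
             (List.replicate (x.length - y.length) (0 : Int) ++ y).getD j 0 ∧
           (List.replicate (y.length - x.length) (0 : Int) ++ x).getD j 0 ≠ 0
         then r + (j : Int) else r) r
    = r + (((PySem.List.enumerate x).filter (fun q => q.2 != 0)).map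
          (fun q => ((max x.length y.length - x.length : Nat) : Int) + q.1)).sum
        - (((PySem.List.enumerate ((x.drop (x.length - min x.length y.length)).zip
              (y.drop (y.length - min x.length y.length)))).filter
            (fun q => q.2.1 != 0 && q.2.1 == q.2.2)).map
          (fun q => ((max x.length y.length - min x.length y.length : Nat) : Int) + q.1)).sum := by
  have hb : ∀ (r : Int) (j : Nat), j ∈ List.range ((List.replicate (y.length - x.length) (0 : Int) ++ x).length) →
      (if (List.replicate (y.length - x.length) (0 : Int) ++ x).getD j 0 ≠
             (List.replicate (x.length - y.length) (0 : Int) ++ y).getD j 0 ∧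
           (List.replicate (y.length - x.length) (0 : Int) ++ x).getD j 0 ≠ 0
         then r + (j : Int) else r)
      = (if (List.replicate (y.length - x.length) (0 : Int) ++ x).getD j 0 ≠
             (List.replicate (x.length - y.length) (0 : Int) ++ y).getD j 0 ∧
           (List.replicate (y.length - x.length) (0 : Int) ++ x).getD j 0 ≠ 0
         then r + ((0 : Int) + (j : Int)) else r) := by
    intro r j _; simp
  rw [foldl_ext _ _ _ _ hb, M_fold _ _ 0 r (by simp; omega)]
  rw [B_sum1 x 0, B_sum2 _ _ 0]
  by_cases hle : x.length ≤ y.length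
  · have h1 : x.length - y.length = 0 := by omega
    have h2 : max x.length y.length = y.length := by omega
    have h3 : min x.length y.length = x.length := by omega
    rw [h1, h2, h3]
    simp only [List.replicate_zero, List.nil_append, Nat.sub_self, List.drop_zero]
    rw [M_padL (y.length - x.length) x y 0 (by omega)]
    rw [M_decomp _ _ _ (by simp; omega)]
    simp only [zero_add, add_zero]
    ring
  · have h1 : y.length - x.length = 0 := by omega
    have h2 : max x.length y.length = x.length := by omega
    have h3 : min x.length y.length = y.length := by omega
    rw [h1, h2, h3]
    simp only [List.replicate_zero, List.nil_append, Nat.sub_self, List.drop_zero]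
    rw [M_padR (x.length - y.length) x y 0 (by omega)]
    rw [M_decomp _ _ _ (by simp; omega)]
    have hs := S1_append (x.take (x.length - y.length)) (x.drop (x.length - y.length)) 0
    rw [List.take_append_drop] at hs
    have hlen : (((x.take (x.length - y.length)).length : Nat) : Int) = ((x.length - y.length : Nat) : Int) := by
      simp only [List.length_take]; omega
    rw [hlen] at hs
    simp only [zero_add, add_zero, Nat.cast_zero] at hs ⊢
    rw [hs]
    ring

-- the outer loops agree
theorem outer_eq (e but : List (List Int)) (r : Int) (h : e.length ≤ but.length) :
    (List.range e.length).foldl (fun res i =>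
      let ei := e.getD i []
      let bi := but.getD i []
      let e_p := List.replicate (bi.length - ei.length) (0 : Int) ++ ei
      let but_p := List.replicate (ei.length - bi.length) (0 : Int) ++ bi
      (List.range e_p.length).foldl (fun r j =>
        if e_p.getD j 0 ≠ but_p.getD j 0 ∧ e_p.getD j 0 ≠ 0 then r + (j : Int) else r) res) r
    = (e.zip but).foldl (fun res p =>
      let x := p.1
      let y := p.2
      let L : Nat := max x.length y.length
      let t : Nat := min x.length y.length
      let s1 : Int := (((PySem.List.enumerate x).filter (fun q => q.2 != 0)).map
          (fun q => ((L - x.length : Nat) : Int) + q.1)).sum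
      let s2 : Int := (((PySem.List.enumerate ((x.drop (x.length - t)).zip (y.drop (y.length - t)))).filter
          (fun q => q.2.1 != 0 && q.2.1 == q.2.2)).map
          (fun q => ((L - t : Nat) : Int) + q.1)).sum
      res + s1 - s2) r := by
  induction e generalizing but r with
  | nil => simp
  | cons x t ih =>
    cases but with
    | nil => simp at h
    | cons y u =>
      simp only [List.length_cons, List.range_succ_eq_map, List.foldl_cons, List.foldl_map,
        List.zip_cons_cons, List.getD_cons_zero, List.getD_cons_succ]
      rw [row_eq x y r]
      exact ih u _ (Nat.succ_le_succ_iff.mp h)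

-- ===== VERDICT (by name: the statement is the Claim_ definition above) =====
theorem profondeurMalPlace_spec : Claim_equal_profondeurMalPlace := by
  intro e but _ hpre
  unfold Spec_profondeurMalPlace profondeurMalPlace profondeurMalPlace_alt
  exact outer_eq e but 0 hpre
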